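-- pv_equiv track=rewrite | github.com/naturalstupid/PyCarnatic | carnatic/thaaLa.py | _partition_nr_into_given_set_of_nrs
-- ===== SOURCE A (Python) =====
-- def _partition_nr_into_given_set_of_nrs(nr, S):
--     nrs = sorted(S, reverse=True)
--     def inner(n, i):
--         if n == 0:
--             yield []
--         for k in range(i, len(nrs)):
--             if nrs[k] <= n:
--                 for rest in inner(n - nrs[k], k):
--                     yield [nrs[k]] + rest
--     ret = list(inner(nr, 0))
--     return ret
-- ===== SOURCE B (Python) =====
-- def _partition_nr_into_given_set_of_nrs(nr, S):
--     nrs = sorted(S, reverse=True)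
--     ret = []
--     stack = [(nr, 0, [])]
--     while stack:
--         rem, start, prefix = stack.pop()
--         if rem == 0:
--             ret.append(prefix)
--         else:
--             for k in range(len(nrs) - 1, start - 1, -1):
--                 if nrs[k] <= rem:
--                     stack.append((rem - nrs[k], k, prefix + [nrs[k]]))
--     return ret
-- ===== Notes on version B (the rewrite author's own statement) =====
-- stated objective: alternative
-- what changed: The recursive generator (nested yield-delegation DFS) is replaced by an iterative explicit-stack worklist of (remaining, start_index, prefix) frames, pushing children in reverse so completed prefixes are emitted in the same preorder.
import Mathlib
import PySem

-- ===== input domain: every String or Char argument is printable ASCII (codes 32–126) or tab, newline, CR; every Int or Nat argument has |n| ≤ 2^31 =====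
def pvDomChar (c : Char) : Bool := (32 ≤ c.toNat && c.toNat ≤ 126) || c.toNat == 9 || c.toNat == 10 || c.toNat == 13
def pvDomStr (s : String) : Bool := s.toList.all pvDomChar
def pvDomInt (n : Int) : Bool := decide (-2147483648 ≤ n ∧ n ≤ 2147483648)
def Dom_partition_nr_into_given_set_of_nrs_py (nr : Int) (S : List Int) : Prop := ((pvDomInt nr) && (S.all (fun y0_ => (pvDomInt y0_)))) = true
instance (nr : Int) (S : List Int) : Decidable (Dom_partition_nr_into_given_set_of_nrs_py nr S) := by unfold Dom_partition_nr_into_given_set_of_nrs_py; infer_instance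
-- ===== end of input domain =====

-- B replaces A's recursive generator with an explicit stack of (remaining, start, prefix) frames
-- (same preorder DFS output by a different, iterative decomposition; avoids Python generator delegation).

-- ===== PORT A =====
-- A's recursive generator `inner(n, i)`: `yield []` when n == 0, then for k in range(i, len(nrs))
-- with nrs[k] <= n, yield [nrs[k]] + rest for each rest in inner(n - nrs[k], k).  The for-loop over
-- range(i, len(nrs)) is List.range' i (nrs.length - i) (Nat indices, always in range), and the
-- concatenation of the yields is flatMap.  `fuel` only makes the recursion total: under
-- Pre_ every nested call strictly decreases n by at least 1, so fuel nr.toNat + 1 is never exhausted.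
def pvInnerA (nrs : List Int) (fuel : Nat) (n : Int) (i : Nat) : List (List Int) :=
  match fuel with
  | 0 => []
  | fuel' + 1 =>
    (if n = 0 then [[]] else []) ++
    (List.range' i (nrs.length - i)).flatMap (fun k =>
      if nrs.getD k 0 ≤ n then (pvInnerA nrs fuel' (n - nrs.getD k 0) k).map (fun r => nrs.getD k 0 :: r) else [])

def partition_nr_into_given_set_of_nrs_py (nr : Int) (S : List Int) : List (List Int) :=
  let nrs := PySem.List.sorted S (fun x => x) true
  pvInnerA nrs (nr.toNat + 1) nr 0

-- ===== PORT B =====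
-- Source B pops (rem, start, prefix); rem == 0 emits prefix, otherwise it pushes the children
-- (k from start with nrs[k] <= rem) in reverse so they pop in ascending k: with a list-as-stack
-- (head = top) that is exactly prepending the children in ascending order, i.e. children ++ rest.
-- `fuel` bounds the number of loop iterations to make the machine total; under Pre_ the
-- tree explored from (nr, 0, []) has at most (len + 1) ^ (nr.toNat + 1) nodes, so it never runs out.
def pvStepB (nrs : List Int) (fuel : Nat) (stack : List (Int × Nat × List Int)) (acc : List (List Int)) : List (List Int) :=
  match fuel, stack with
  | _, [] => acc
  | 0, _ :: _ => acc
  | fuel' + 1, (rem, start, pre) :: rest =>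
    if rem = 0 then pvStepB nrs fuel' rest (acc ++ [pre])
    else pvStepB nrs fuel'
      (((List.range' start (nrs.length - start)).flatMap (fun k =>
          if nrs.getD k 0 ≤ rem then [(rem - nrs.getD k 0, k, pre ++ [nrs.getD k 0])] else [])) ++ rest)
      acc

def partition_nr_into_given_set_of_nrs_py_alt (nr : Int) (S : List Int) : List (List Int) :=
  let nrs := PySem.List.sorted S (fun x => x) true
  pvStepB nrs ((nrs.length + 1) ^ (nr.toNat + 1)) [(nr, 0, [])] []

-- ===== PRECONDITION & SPEC =====
-- Pre_ excludes exactly the inputs on which A never returns (RecursionError): as soon as S contains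
-- some s ≤ 0 with s ≤ nr, the DFS reaches a state n with nrs[k] = s ≤ n and n - s ≥ n, an infinite
-- self-recursion.  If every nonpositive element of S exceeds nr, only positive elements are ever
-- picked, n strictly decreases, and A terminates.
def Pre_partition_nr_into_given_set_of_nrs_py (nr : Int) (S : List Int) : Prop :=
  ∀ s ∈ S, s ≤ 0 → nr < s
instance (nr : Int) (S : List Int) : Decidable (Pre_partition_nr_into_given_set_of_nrs_py nr S) := by unfold Pre_partition_nr_into_given_set_of_nrs_py; infer_instance

def pvWitness_partition_nr_into_given_set_of_nrs_py : Int × List Int := (4, [1, 2])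

def Spec_partition_nr_into_given_set_of_nrs_py (nr : Int) (S : List Int) (out : List (List Int)) : Prop := out = partition_nr_into_given_set_of_nrs_py_alt nr S
instance (nr : Int) (S : List Int) (out : List (List Int)) : Decidable (Spec_partition_nr_into_given_set_of_nrs_py nr S out) := by unfold Spec_partition_nr_into_given_set_of_nrs_py; infer_instance

-- ===== CLAIM (what is proved, stated in full; the proofs are below) =====
def Claim_equal_partition_nr_into_given_set_of_nrs_py : Prop := ∀ (nr : Int) (S : List Int), Dom_partition_nr_into_given_set_of_nrs_py nr S → Pre_partition_nr_into_given_set_of_nrs_py nr S → Spec_partition_nr_into_given_set_of_nrs_py nr S (partition_nr_into_given_set_of_nrs_py nr S)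

-- ===== LEMMAS AND PROOFS =====

-- Fuel irrelevance for A's port: any two fuels ≥ n.toNat + 1 compute the same value, given that
-- every nonpositive element of nrs exceeds nr (so every picked element is positive) and n ≤ nr.
theorem pvInnerA_fuel (nrs : List Int) (nr : Int) (hP : ∀ s ∈ nrs, s ≤ 0 → nr < s) :
    ∀ (f1 f2 : Nat) (n : Int) (i : Nat), n ≤ nr → n.toNat + 1 ≤ f1 → n.toNat + 1 ≤ f2 →
      pvInnerA nrs f1 n i = pvInnerA nrs f2 n i := by
  intro f1
  induction f1 with
  | zero => intro f2 n i _ h1 _; omega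
  | succ g1 IH =>
    intro f2 n i hn h1 h2
    obtain ⟨g2, rfl⟩ : ∃ g2, f2 = g2 + 1 := ⟨f2 - 1, by omega⟩
    simp only [pvInnerA]
    congr 1
    apply List.flatMap_congr
    intro k hk
    have hklen : k < nrs.length := by rw [List.mem_range'_1] at hk; omega
    by_cases hle : nrs.getD k 0 ≤ n
    · simp only [if_pos hle]
      have hmem : nrs.getD k 0 ∈ nrs := by
        rw [List.getD_eq_getElem _ _ hklen]; exact List.getElem_mem hklen
      have hpos : 0 < nrs.getD k 0 := by
        by_cases h : nrs.getD k 0 ≤ 0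
        · have := hP _ hmem h; omega
        · omega
      rw [IH g2 (n - nrs.getD k 0) k (by omega) (by omega) (by omega)]
    · rw [if_neg hle, if_neg hle]

-- Clearing a list of frames one after another: if each frame is processed in ≤ B steps
-- contributing E fr, the whole list is processed in ≤ length * B steps contributing the
-- concatenation, in order.
theorem pvStepB_chain (nrs : List Int) (B : Nat) (E : Int × Nat × List Int → List (List Int))
    (frames : List (Int × Nat × List Int))
    (H : ∀ fr ∈ frames, ∃ c, 0 < c ∧ c ≤ B ∧ ∀ (fuel : Nat) rest acc, c ≤ fuel →
        pvStepB nrs fuel (fr :: rest) acc = pvStepB nrs (fuel - c) rest (acc ++ E fr)) :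
    ∃ c, c ≤ frames.length * B ∧ ∀ (fuel : Nat) rest acc, c ≤ fuel →
        pvStepB nrs fuel (frames ++ rest) acc = pvStepB nrs (fuel - c) rest (acc ++ (frames.map E).flatten) := by
  induction frames with
  | nil => exact ⟨0, by simp, fun fuel rest acc _ => by simp⟩
  | cons fr frames IH =>
    obtain ⟨c1, hc1pos, hc1B, h1⟩ := H fr (List.mem_cons_self)
    obtain ⟨c2, hc2B, h2⟩ := IH (fun fr' hfr' => H fr' (List.mem_cons_of_mem _ hfr'))
    refine ⟨c1 + c2, by rw [List.length_cons, Nat.succ_mul]; omega, fun fuel rest acc hf => ?_⟩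
    rw [List.cons_append, h1 fuel _ _ (by omega), h2 (fuel - c1) rest _ (by omega)]
    have : fuel - c1 - c2 = fuel - (c1 + c2) := by omega
    rw [this, List.map_cons, List.flatten_cons, ← List.append_assoc]

-- A frame with rem ≤ 0 is processed in exactly one step: when rem = 0 it emits its prefix,
-- otherwise it has no children (no element of nrs is ≤ rem, by Pre_) and emits nothing —
-- matching A, whose sub-enumeration at such rem is [[]] resp. [].
theorem pvStepB_leaf (nrs : List Int) (nr : Int) (hP : ∀ s ∈ nrs, s ≤ 0 → nr < s)
    (rem : Int) (hneg : rem ≤ 0) (hrem : rem ≤ nr) (start : Nat) (pre : List Int) :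
    ∃ c, 0 < c ∧ c ≤ (nrs.length + 1) ^ (rem.toNat + 1) ∧
      ∀ (fuel : Nat) (rest : List (Int × Nat × List Int)) (acc : List (List Int)), c ≤ fuel →
        pvStepB nrs fuel ((rem, start, pre) :: rest) acc =
          pvStepB nrs (fuel - c) rest (acc ++ (pvInnerA nrs (rem.toNat + 1) rem start).map (fun r => pre ++ r)) := by
  refine ⟨1, Nat.one_pos, Nat.one_le_pow _ _ (by omega), fun fuel rest acc hf => ?_⟩
  obtain ⟨f, rfl⟩ : ∃ f, fuel = f + 1 := ⟨fuel - 1, by omega⟩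
  have htn : rem.toNat = 0 := by omega
  rw [htn]
  by_cases h0 : rem = 0
  · subst h0
    have hz : List.flatMap (fun _ => ([] : List (List Int))) (List.range' start (nrs.length - start)) = [] :=
      List.flatMap_eq_nil_iff.mpr (fun _ _ => rfl)
    simp [pvStepB, pvInnerA, hz]
  · have hnochild : ∀ k ∈ List.range' start (nrs.length - start),
        (if nrs.getD k 0 ≤ rem then [((rem - nrs.getD k 0 : Int), k, pre ++ [nrs.getD k 0])] else []) = ([] : List (Int × Nat × List Int)) := by
      intro k hk
      have hklen : k < nrs.length := by rw [List.mem_range'_1] at hk; omega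
      have hmem : nrs.getD k 0 ∈ nrs := by
        rw [List.getD_eq_getElem _ _ hklen]; exact List.getElem_mem hklen
      have hgt : ¬ nrs.getD k 0 ≤ rem := by
        intro hle
        have := hP _ hmem (by omega)
        omega
      rw [if_neg hgt]
    have hinner : pvInnerA nrs 1 rem start = [] := by
      simp only [pvInnerA, if_neg h0, List.nil_append]
      apply List.flatMap_eq_nil_iff.mpr
      intro k _
      split
      · rfl
      · rfl
    simp only [pvStepB, if_neg h0]
    rw [List.flatMap_eq_nil_iff.mpr hnochild, hinner]
    simp

-- one-step unfolding of pvInnerA at a successor fuel (rw-friendly: unfolds exactly one level)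
theorem pvInnerA_succ (nrs : List Int) (f : Nat) (n : Int) (i : Nat) :
    pvInnerA nrs (f + 1) n i =
      (if n = 0 then [[]] else []) ++
      (List.range' i (nrs.length - i)).flatMap (fun k =>
        if nrs.getD k 0 ≤ n then (pvInnerA nrs f (n - nrs.getD k 0) k).map (fun r => nrs.getD k 0 :: r) else []) := rfl

-- One frame (rem, start, pre) is fully processed by the machine in some c ≤ (len+1)^(rem.toNat+1)
-- steps, and contributes exactly A's sub-enumeration for (rem, start), each result prefixed by pre.
theorem pvStepB_frame (nrs : List Int) (nr : Int) (hP : ∀ s ∈ nrs, s ≤ 0 → nr < s) :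
    ∀ (m : Nat) (rem : Int), rem.toNat ≤ m → rem ≤ nr → ∀ (start : Nat) (pre : List Int),
      ∃ c, 0 < c ∧ c ≤ (nrs.length + 1) ^ (rem.toNat + 1) ∧
        ∀ (fuel : Nat) (rest : List (Int × Nat × List Int)) (acc : List (List Int)), c ≤ fuel →
          pvStepB nrs fuel ((rem, start, pre) :: rest) acc =
            pvStepB nrs (fuel - c) rest (acc ++ (pvInnerA nrs (rem.toNat + 1) rem start).map (fun r => pre ++ r)) := by
  intro m
  induction m with
  | zero =>
    intro rem h0 hrem start pre
    exact pvStepB_leaf nrs nr hP rem (by omega) hrem start pre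
  | succ m IH =>
    intro rem hm hrem start pre
    by_cases hneg : rem ≤ 0
    · exact pvStepB_leaf nrs nr hP rem hneg hrem start pre
    have hpos : 0 < rem := by omega
    have hrem0 : ¬ rem = 0 := by omega
    set E : Int × Nat × List Int → List (List Int) :=
      fun fr => (pvInnerA nrs (fr.1.toNat + 1) fr.1 fr.2.1).map (fun r => fr.2.2 ++ r) with hE
    set children : List (Int × Nat × List Int) :=
      (List.range' start (nrs.length - start)).flatMap (fun k =>
        if nrs.getD k 0 ≤ rem then [((rem - nrs.getD k 0 : Int), k, pre ++ [nrs.getD k 0])] else []) with hch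
    have H : ∀ fr ∈ children, ∃ c, 0 < c ∧ c ≤ (nrs.length + 1) ^ rem.toNat ∧
        ∀ (fuel : Nat) rest acc, c ≤ fuel →
          pvStepB nrs fuel (fr :: rest) acc = pvStepB nrs (fuel - c) rest (acc ++ E fr) := by
      intro fr hfr
      rw [hch, List.mem_flatMap] at hfr
      obtain ⟨k, hk, hin⟩ := hfr
      have hklen : k < nrs.length := by rw [List.mem_range'_1] at hk; omega
      have hmem : nrs.getD k 0 ∈ nrs := by
        rw [List.getD_eq_getElem _ _ hklen]; exact List.getElem_mem hklen
      by_cases hs : nrs.getD k 0 ≤ rem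
      swap
      · rw [if_neg hs] at hin; exact absurd hin (List.not_mem_nil)
      rw [if_pos hs, List.mem_singleton] at hin
      subst hin
      have hspos : 0 < nrs.getD k 0 := by
        by_cases h : nrs.getD k 0 ≤ 0
        · have := hP _ hmem h; omega
        · omega
      obtain ⟨c, hc0, hcB, hcspec⟩ :=
        IH (rem - nrs.getD k 0) (by omega) (by omega) k (pre ++ [nrs.getD k 0])
      exact ⟨c, hc0, le_trans hcB (Nat.pow_le_pow_right (by omega) (by omega)), hcspec⟩
    obtain ⟨cc, hccB, hcc⟩ := pvStepB_chain nrs ((nrs.length + 1) ^ rem.toNat) E children H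
    have hlen : children.length ≤ nrs.length := by
      rw [hch, List.length_flatMap]
      have hb : ∀ x ∈ (List.range' start (nrs.length - start)).map (fun k =>
          (if nrs.getD k 0 ≤ rem then [((rem - nrs.getD k 0 : Int), k, pre ++ [nrs.getD k 0])] else []).length), x ≤ 1 := by
        intro x hx
        rw [List.mem_map] at hx
        obtain ⟨k, _, rfl⟩ := hx
        split <;> simp
      have := List.sum_le_card_nsmul _ 1 hb
      simp only [List.length_map, List.length_range', smul_eq_mul, mul_one] at this
      omega
    have hone : (1 : Nat) ≤ (nrs.length + 1) ^ rem.toNat := Nat.one_le_pow _ _ (by omega)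
    refine ⟨1 + cc, by omega, ?_, fun fuel rest acc hf => ?_⟩
    · have hmul : children.length * (nrs.length + 1) ^ rem.toNat ≤ nrs.length * (nrs.length + 1) ^ rem.toNat :=
        Nat.mul_le_mul_right _ hlen
      have hpow : (nrs.length + 1) ^ (rem.toNat + 1) = (nrs.length + 1) ^ rem.toNat * (nrs.length + 1) := pow_succ _ _
      have : (nrs.length + 1) ^ rem.toNat * (nrs.length + 1)
           = nrs.length * (nrs.length + 1) ^ rem.toNat + (nrs.length + 1) ^ rem.toNat := by ring
      omega
    · obtain ⟨f, rfl⟩ : ∃ f, fuel = f + 1 := ⟨fuel - 1, by omega⟩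
      have hstep : pvStepB nrs (f + 1) ((rem, start, pre) :: rest) acc = pvStepB nrs f (children ++ rest) acc := by
        simp only [pvStepB, if_neg hrem0]
        rw [hch]
      rw [hstep, hcc f rest acc (by omega)]
      have hfu : f - cc = f + 1 - (1 + cc) := by omega
      rw [hfu]
      congr 1
      -- one DFS node: the children's contributions concatenate to A's sub-enumeration at (rem, start)
      have hg : ∃ g, rem.toNat = g + 1 := ⟨rem.toNat - 1, by omega⟩
      obtain ⟨g, hgt⟩ := hg
      congr 1
      have hsucc : rem.toNat + 1 = g + 1 + 1 := by omega
      rw [← List.flatMap_def, hch, List.flatMap_assoc, hsucc, pvInnerA_succ, if_neg hrem0,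
        List.nil_append, List.map_flatMap]
      apply List.flatMap_congr
      intro k hk
      have hklen : k < nrs.length := by rw [List.mem_range'_1] at hk; omega
      have hmem : nrs.getD k 0 ∈ nrs := by
        rw [List.getD_eq_getElem _ _ hklen]; exact List.getElem_mem hklen
      by_cases hs : nrs.getD k 0 ≤ rem
      swap
      · rw [if_neg hs, if_neg hs]; rfl
      have hspos : 0 < nrs.getD k 0 := by
        by_cases h : nrs.getD k 0 ≤ 0
        · have := hP _ hmem h; omega
        · omega
      rw [if_pos hs, if_pos hs]
      have hsingle : ([((rem - nrs.getD k 0 : Int), k, pre ++ [nrs.getD k 0])] : List (Int × Nat × List Int)).flatMap E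
          = E ((rem - nrs.getD k 0 : Int), k, pre ++ [nrs.getD k 0]) := by simp
      rw [hsingle, hE]
      simp only []
      rw [pvInnerA_fuel nrs nr hP ((rem - nrs.getD k 0).toNat + 1) (g + 1) (rem - nrs.getD k 0) k (by omega) (by omega) (by omega)]
      rw [List.map_map]
      apply List.map_congr_left
      intro r _
      simp

-- ===== VERDICT (by name: the statement is the Claim_ definition above) =====
theorem partition_nr_into_given_set_of_nrs_py_spec : Claim_equal_partition_nr_into_given_set_of_nrs_py := by
  intro nr S _hDom hPre
  unfold Spec_partition_nr_into_given_set_of_nrs_py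
  unfold partition_nr_into_given_set_of_nrs_py partition_nr_into_given_set_of_nrs_py_alt
  simp only []
  set nrs := PySem.List.sorted S (fun x => x) true with hnrs
  have hP : ∀ s ∈ nrs, s ≤ 0 → nr < s := by
    intro s hs
    exact hPre s ((PySem.List.mem_sorted S _ _ s).mp (hnrs ▸ hs))
  obtain ⟨c, _hc0, hcB, hrun⟩ := pvStepB_frame nrs nr hP nr.toNat nr le_rfl le_rfl 0 []
  rw [hrun _ [] [] (le_trans hcB le_rfl)]
  simp [pvStepB]
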